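-- pv_equiv track=rewrite | github.com/GuXiangFly/paraphraseCrawler | util/common_utils.py | get_english_str
-- ===== SOURCE A (Python) =====
-- def is_english_char(ch):
--     ch = ch.lower()
--     if 97 <= ord(ch) & ord(ch) <= 122:
--         return True
--     return False
--
-- def get_english_str(item):
--     item = str(item).lower()
--     firstAlpha = ""
--     endAlpha = ""
--     has_english = False
--     for char in item:
--         if is_english_char(char):
--             firstAlpha = char
--             has_english = True
--             break
--     for char in item:
--         if is_english_char(char):
--             endAlpha = char
--     if (has_english == False):
--         return ""
--     index = item.index(firstAlpha)
--     indexend = item.rindex(endAlpha)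
--     result = item[index:indexend + 1]
--     return result
-- ===== SOURCE B (Python) =====
-- def get_english_str(item):
--     # Strip-based: remove every non-letter character from both ends in one strip call.
--     s = str(item).lower()
--     junk = ''.join(c for c in s if not ('a' <= c <= 'z'))
--     return s.strip(junk)
-- ===== Notes on version B (the rewrite author's own statement) =====
-- stated objective: idiomatic
-- what changed: Replaces the two explicit character-scan loops plus index/rindex/slice with one str.strip call whose strip-set is the non-letter characters of the string.
import Mathlib
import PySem

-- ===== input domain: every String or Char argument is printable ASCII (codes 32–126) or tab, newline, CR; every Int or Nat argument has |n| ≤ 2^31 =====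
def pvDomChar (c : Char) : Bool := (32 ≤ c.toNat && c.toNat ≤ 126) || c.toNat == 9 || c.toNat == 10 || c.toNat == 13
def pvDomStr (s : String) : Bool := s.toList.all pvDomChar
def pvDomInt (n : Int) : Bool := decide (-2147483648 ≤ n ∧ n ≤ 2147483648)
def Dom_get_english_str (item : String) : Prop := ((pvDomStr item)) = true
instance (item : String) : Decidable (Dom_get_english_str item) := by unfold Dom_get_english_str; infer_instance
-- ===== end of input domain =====

-- B replaces A's two character-scan loops plus index/rindex/slice by one str.strip
-- call whose strip-set is the non-letter characters of the string (idiomatic, same cost).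

-- ===== PORT A =====
-- is_english_char: Python's '97 <= ord(ch) & ord(ch) <= 122' — '&' binds tighter than the
-- comparisons, so it is the chained comparison 97 <= (ord(ch) & ord(ch)) <= 122.
def is_english_char (ch : Char) : Bool :=
  let ch := PySem.Chars.lowerChar ch
  decide (97 ≤ PySem.Int.band (ch.toNat : Int) (ch.toNat : Int) ∧
          PySem.Int.band (ch.toNat : Int) (ch.toNat : Int) ≤ 122)

-- the first 'for char in item: … break' loop: returns (firstAlpha, has_english)
def firstAlphaLoop : List Char → List Char × Bool
  | [] => ([], false)
  | c :: t => if is_english_char c then ([c], true) else firstAlphaLoop t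

def get_english_str (item : String) : String :=
  let itemL := PySem.Str.lower item
  let fb := firstAlphaLoop itemL.toList
  -- the second loop: endAlpha keeps the last english char seen
  let endAlpha := itemL.toList.foldl (fun acc c => if is_english_char c then [c] else acc) ([] : List Char)
  if fb.2 = false then ""
  else
    -- item.index / item.rindex: the sought char is present on this branch, so ValueError
    -- is impossible and index/rindex coincide with find/rfind (exact here)
    let index := PySem.Chars.find itemL.toList fb.1
    let indexend := PySem.Chars.rfind itemL.toList endAlpha
    PySem.Str.slice itemL (some index) (some (indexend + 1))

-- ===== PORT B =====
def get_english_str_alt (item : String) : String :=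
  let s := PySem.Str.lower item
  let junk := String.ofList (s.toList.filter (fun c => !decide ('a' ≤ c ∧ c ≤ 'z')))
  PySem.Str.stripChars s junk

-- ===== PRECONDITION & SPEC =====
def Spec_get_english_str (item : String) (out : String) : Prop := out = get_english_str_alt item
instance (item : String) (out : String) : Decidable (Spec_get_english_str item out) := by unfold Spec_get_english_str; infer_instance

-- ===== CLAIM (what is proved, stated in full; the proofs are below) =====
def Claim_equal_get_english_str : Prop := ∀ (item : String), Dom_get_english_str item → Spec_get_english_str item (get_english_str item)

-- ===== LEMMAS AND PROOFS =====

-- the non-letter predicate on the already-lowered string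
def engQ (c : Char) : Bool := !decide ('a' ≤ c ∧ c ≤ 'z')

theorem char_le_iff (a b : Char) : a ≤ b ↔ a.toNat ≤ b.toNat := by
  rw [Char.le_def, UInt32.le_iff_toNat_le_toNat]; rfl

theorem lowerChar_idem (c : Char) :
    PySem.Chars.lowerChar (PySem.Chars.lowerChar c) = PySem.Chars.lowerChar c := by
  have hA : ('A' : Char).toNat = 65 := by decide
  have hZ : ('Z' : Char).toNat = 90 := by decide
  simp only [PySem.Chars.lowerChar, PySem.Chars.isupper, Bool.and_eq_true, decide_eq_true_eq,
    char_le_iff, hA, hZ]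
  split_ifs with h1 h2
  · exfalso
    have hv : (Char.ofNat (c.toNat + 32)).toNat = c.toNat + 32 := by
      rw [Char.toNat_ofNat, if_pos]
      exact Or.inl (by omega)
    omega
  · rfl
  · rfl

theorem is_english_char_fixed (c : Char) (h : PySem.Chars.lowerChar c = c) :
    is_english_char c = !engQ c := by
  have ha : ('a' : Char).toNat = 97 := by decide
  have hz : ('z' : Char).toNat = 122 := by decide
  simp only [is_english_char, engQ, h, PySem.Int.band_natCast, Bool.not_not,
    char_le_iff, ha, hz, decide_eq_decide]
  have hs : c.toNat &&& c.toNat = c.toNat := Nat.and_self _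
  rw [hs]
  omega

theorem mem_lower_fixed (s : List Char) (c : Char) (hc : c ∈ PySem.Chars.lower s) :
    PySem.Chars.lowerChar c = c := by
  simp only [PySem.Chars.lower, List.mem_map] at hc
  obtain ⟨d, _, rfl⟩ := hc
  exact lowerChar_idem d

theorem singleton_prefix_head (c : Char) (xs : List Char) : [c] <+: xs ↔ xs.head? = some c := by
  cases xs with
  | nil => simp
  | cons a as => simp [List.cons_prefix_cons, eq_comm]

theorem dropWhile_congr_mem (p q : Char → Bool) (l : List Char) (h : ∀ c ∈ l, p c = q c) :
    l.dropWhile p = l.dropWhile q := by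
  induction l with
  | nil => rfl
  | cons a as ih =>
    simp only [List.dropWhile_cons, h a (by simp)]
    split
    · exact ih fun c hc => h c (by simp [hc])
    · rfl

theorem firstAlphaLoop_eq (l : List Char) (h : ∀ c ∈ l, is_english_char c = !engQ c) :
    firstAlphaLoop l = (match l.dropWhile engQ with
      | [] => (([] : List Char), false)
      | c :: _ => ([c], true)) := by
  induction l with
  | nil => rfl
  | cons a as ih =>
    simp only [firstAlphaLoop, List.dropWhile_cons, h a (by simp)]
    by_cases ha : engQ a
    · simp [ha, ih fun c hc => h c (by simp [hc])]
    · simp [ha]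

theorem lastFold_eq (l : List Char) (h : ∀ c ∈ l, is_english_char c = !engQ c) (acc : List Char) :
    l.foldl (fun acc c => if is_english_char c then [c] else acc) acc =
    (match l.reverse.dropWhile engQ with
      | [] => acc
      | e :: _ => [e]) := by
  induction l generalizing acc with
  | nil => rfl
  | cons a as ih =>
    simp only [List.foldl_cons, List.reverse_cons, List.dropWhile_append]
    rw [ih (fun c hc => h c (by simp [hc]))]
    have ha := h a (by simp)
    cases hd : as.reverse.dropWhile engQ with
    | nil =>
      simp only [List.isEmpty_nil, if_true, List.dropWhile_cons, List.dropWhile_nil]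
      by_cases hqa : engQ a
      · simp [hqa, ha]
      · simp [hqa, ha]
    | cons e t' =>
      simp

theorem head_dropWhile_false (p : Char → Bool) (l : List Char) (c : Char) (t : List Char)
    (h : l.dropWhile p = c :: t) : p c = false := by
  induction l with
  | nil => simp at h
  | cons a as ih =>
    rw [List.dropWhile_cons] at h
    split at h
    next hpa => exact ih h
    next hpa => cases h; simpa using hpa

theorem find_single (l : List Char) (c : Char) (t : List Char) (h : l.dropWhile engQ = c :: t) :
    PySem.Chars.find l [c] = ((l.takeWhile engQ).length : Int) := by
  have hdsuf : l.dropWhile engQ <:+ l := List.dropWhile_suffix engQ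
  have hcmem : c ∈ l := hdsuf.subset (by rw [h]; simp)
  have h0 : 0 ≤ PySem.Chars.find l [c] :=
    (PySem.Chars.find_nonneg_iff l [c]).mpr ((List.singleton_infix_iff c l).mpr hcmem)
  obtain ⟨hpre, hmin⟩ := PySem.Chars.find_spec h0
  set f := (PySem.Chars.find l [c]).toNat with hf
  set p := l.takeWhile engQ with hp
  have hlen : p.length ≤ l.length := (List.takeWhile_prefix engQ).length_le
  have hdrop : l.drop p.length = c :: t := by
    conv_lhs => rw [← List.takeWhile_append_dropWhile (p := engQ) (l := l)]
    rw [← hp, h, List.drop_left]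
  have hccol : engQ c = false := head_dropWhile_false engQ l c t h
  have hfeq : f = p.length := by
    rcases Nat.lt_or_ge f p.length with hlt | hge
    · exfalso
      have hget : l[f]? = some c := by
        rw [← List.head?_drop]
        rcases hpre with ⟨t2, ht2⟩
        rw [← ht2]; rfl
      have hgetl : l[f]'(by omega) = c := by
        rw [List.getElem?_eq_getElem (by omega)] at hget
        exact Option.some.inj hget
      have hpl : p[f]'hlt = l[f]'(by omega) := (List.takeWhile_prefix engQ).getElem hlt
      have hqc : engQ c = true := by
        rw [← hgetl, ← hpl]
        exact List.mem_takeWhile_imp (List.getElem_mem _)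
      simp [hqc] at hccol
    · by_contra hne
      exact hmin p.length (by omega) (by rw [hdrop]; exact ⟨t, rfl⟩)
  rw [← Int.toNat_of_nonneg h0]
  exact congrArg Nat.cast hfeq

theorem rfind_go_high (l : List Char) (e : Char) (r : Nat)
    (hr : l[r]? = some e) (hgt : ∀ i, r < i → l[i]? ≠ some e) :
    ∀ k, r ≤ k → k ≤ l.length → PySem.Chars.rfind.go l [e] k = (r : Int) := by
  intro k
  induction k with
  | zero =>
    intro h1 _
    have hr0 : r = 0 := Nat.le_zero.mp h1
    subst hr0
    have hpre : [e].isPrefixOf l = true := by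
      rw [List.isPrefixOf_iff_prefix, singleton_prefix_head]
      rwa [List.head?_eq_getElem?]
    simp [PySem.Chars.rfind.go, hpre]
  | succ j ih =>
    intro h1 h2
    rcases Nat.lt_or_ge r (j + 1) with hlt | hge
    · have hpre : [e].isPrefixOf (l.drop (j + 1)) = false := by
        rw [Bool.eq_false_iff]
        intro hc
        rw [List.isPrefixOf_iff_prefix, singleton_prefix_head, List.head?_drop] at hc
        exact hgt (j + 1) hlt hc
      simp only [PySem.Chars.rfind.go, hpre]
      exact ih (by omega) (by omega)
    · have hre : r = j + 1 := by omega
      subst hre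
      have hpre : [e].isPrefixOf (l.drop (j + 1)) = true := by
        rw [List.isPrefixOf_iff_prefix, singleton_prefix_head, List.head?_drop]
        exact hr
      simp [PySem.Chars.rfind.go, hpre]

theorem rfind_single (l : List Char) (e : Char) (t' : List Char)
    (h : l.reverse.dropWhile engQ = e :: t') :
    PySem.Chars.rfind l [e] = ((l.length - 1 - (l.reverse.takeWhile engQ).length : Nat) : Int) := by
  set q := l.reverse.takeWhile engQ with hq
  have hrev : l.reverse = q ++ (e :: t') := by
    rw [hq, ← h, List.takeWhile_append_dropWhile]
  have hl : l = (t'.reverse ++ [e]) ++ q.reverse := by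
    have := congrArg List.reverse hrev
    simpa [List.reverse_append] using this
  have hlen : l.length = q.length + t'.length + 1 := by
    have := congrArg List.length hrev
    simp at this
    omega
  have hqe : engQ e = false := head_dropWhile_false engQ l.reverse e t' h
  have hl2 : l = t'.reverse ++ e :: q.reverse := by
    rw [hl]; simp
  have hr : l[t'.length]? = some e := by
    rw [hl2, List.getElem?_append_right (by simp)]
    simp
  have hgt : ∀ i, t'.length < i → l[i]? ≠ some e := by
    intro i hi hc
    rw [hl2, List.getElem?_append_right (by simp; omega)] at hc
    have hme : e ∈ e :: q.reverse := List.mem_of_getElem? hc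
    have hmq : e ∈ q.reverse := by
      rw [List.getElem?_cons] at hc
      have hoff : i - t'.reverse.length ≠ 0 := by simp; omega
      rw [if_neg hoff] at hc
      exact List.mem_of_getElem? hc
    have hqt : engQ e = true := List.mem_takeWhile_imp (by rwa [List.mem_reverse] at hmq)
    simp [hqt] at hqe
  have hgo := rfind_go_high l e t'.length hr hgt l.length (by omega) (le_refl _)
  have hdef : PySem.Chars.rfind l [e] = PySem.Chars.rfind.go l [e] l.length := rfl
  rw [hdef, hgo]
  congr 1
  omega

theorem final_list (l : List Char) (c : Char) (t : List Char)
    (hd : l.dropWhile engQ = c :: t) :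
    ((l.drop (l.takeWhile engQ).length).take
        (l.length - 1 - (l.reverse.takeWhile engQ).length + 1 - (l.takeWhile engQ).length)) =
    ((l.dropWhile engQ).reverse.dropWhile engQ).reverse := by
  set p := l.takeWhile engQ with hp
  set d := l.dropWhile engQ with hdd
  set u := d.reverse.dropWhile engQ with hu
  set qd := d.reverse.takeWhile engQ with hqd
  have hcq : engQ c = false := head_dropWhile_false engQ l c t hd
  have hcd : c ∈ d.reverse := by rw [List.mem_reverse, hd]; simp
  have hpd : p ++ d = l := List.takeWhile_append_dropWhile
  have hqu : qd ++ u = d.reverse := List.takeWhile_append_dropWhile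
  have hune : u ≠ [] := by
    intro h0
    have := (List.dropWhile_eq_nil_iff).mp (hu ▸ h0) c hcd
    simp [this] at hcq
  have hrev : l.reverse = d.reverse ++ p.reverse := by
    rw [← hpd]; simp
  have hqeq : l.reverse.takeWhile engQ = qd := by
    rw [hrev, List.takeWhile_append]
    rw [if_neg]
    intro hlen
    have h5 : qd = d.reverse := (List.takeWhile_prefix engQ).eq_of_length hlen
    have h6 : engQ c = true :=
      List.mem_takeWhile_imp (p := engQ) (l := d.reverse) (x := c) (by rw [← hqd, h5]; exact hcd)
    simp [h6] at hcq
  have hdu : d = u.reverse ++ qd.reverse := by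
    have := congrArg List.reverse hqu
    simpa [List.reverse_append] using this.symm
  have hdrop : l.drop p.length = d := by
    rw [← hpd, List.drop_left]
  have hlenl : l.length = p.length + d.length := by
    rw [← hpd]; simp
  have hlend : d.length = qd.length + u.length := by
    have := congrArg List.length hqu
    simpa using this.symm.trans (by simp)
  have hupos : 1 ≤ u.length := List.length_pos_of_ne_nil hune
  rw [hqeq, hdrop]
  have hamt : l.length - 1 - qd.length + 1 - p.length = u.length := by omega
  rw [hamt, hdu]
  have hur : u.length = u.reverse.length := by simp
  rw [hur, List.take_left]

theorem main_eq (item : String) : get_english_str item = get_english_str_alt item := by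
  have hlist : (PySem.Str.lower item).toList = PySem.Chars.lower item.toList := PySem.Str.toList_lower item
  set l := PySem.Chars.lower item.toList with hl
  have hfix : ∀ c ∈ l, is_english_char c = !engQ c := fun c hc =>
    is_english_char_fixed c (mem_lower_fixed item.toList c hc)
  have hpj : ∀ c ∈ l, ((l.filter (fun c => !decide ('a' ≤ c ∧ c ≤ 'z'))).contains c) = engQ c := by
    intro c hc
    rw [Bool.eq_iff_iff, List.contains_iff_mem, List.mem_filter]
    unfold engQ
    constructor
    · rintro ⟨_, h2⟩; exact h2
    · intro h2; exact ⟨hc, h2⟩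
  simp only [get_english_str, get_english_str_alt, PySem.Str.slice, PySem.Str.stripChars,
    PySem.Chars.stripChars, hlist, String.toList_ofList, PySem.Chars.slice_eq_listSlice]
  rw [firstAlphaLoop_eq l hfix, lastFold_eq l hfix []]
  rw [dropWhile_congr_mem _ engQ l hpj]
  rw [dropWhile_congr_mem (fun c => (l.filter (fun c => !decide ('a' ≤ c ∧ c ≤ 'z'))).contains c) engQ
    ((l.dropWhile engQ).reverse)
    (fun c hc => hpj c ((List.dropWhile_suffix engQ).subset (List.mem_reverse.mp hc)))]
  cases hd : l.dropWhile engQ with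
  | nil =>
    simp
  | cons c t =>
    have hex : ∃ e t', l.reverse.dropWhile engQ = e :: t' := by
      cases hrd : l.reverse.dropWhile engQ with
      | nil =>
        exfalso
        have hcm : c ∈ l.reverse := by
          rw [List.mem_reverse]
          exact (List.dropWhile_suffix engQ).subset (by rw [hd]; simp)
        have hqt := (List.dropWhile_eq_nil_iff).mp hrd c hcm
        have hcq : engQ c = false := head_dropWhile_false engQ l c t hd
        simp [hqt] at hcq
      | cons e t' => exact ⟨e, t', rfl⟩
    obtain ⟨e, t', he⟩ := hex
    rw [he]
    simp only
    rw [find_single l c t hd, rfind_single l e t' he]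
    have hcast : ((l.length - 1 - (l.reverse.takeWhile engQ).length : Nat) : Int) + 1 =
        ((l.length - 1 - (l.reverse.takeWhile engQ).length + 1 : Nat) : Int) := by push_cast; ring
    rw [hcast, PySem.List.slice_natCast]
    rw [if_neg (by simp)]
    congr 1
    rw [← hd]
    exact final_list l c t hd

-- ===== VERDICT (by name: the statement is the Claim_ definition above) =====
theorem get_english_str_spec : Claim_equal_get_english_str := by
  intro item _
  unfold Spec_get_english_str
  exact main_eq item
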